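-- pv_equiv track=rewrite | github.com/MrBrantCode/unitest_baseline | mut_generate/mist_train_cf/cf_13443/solution.py | sum_neighbors
-- ===== SOURCE A (Python) =====
-- def sum_neighbors(matrix):
--     rows = len(matrix)
--     cols = len(matrix[0])
--     new_matrix = [[0] * cols for _ in range(rows)]
--
--     for i in range(rows):
--         for j in range(cols):
--             total = matrix[i][j]
--
--             if i > 0:
--                 total += matrix[i - 1][j]
--             if i < rows - 1:
--                 total += matrix[i + 1][j]
--             if j > 0:
--                 total += matrix[i][j - 1]
--             if j < cols - 1:
--                 total += matrix[i][j + 1]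
--
--             new_matrix[i][j] = total
--
--     return new_matrix
-- ===== SOURCE B (Python) =====
-- def sum_neighbors(matrix):
--     cols = len(matrix[0])
--     zero_row = [0] * (cols + 2)
--     pad = [zero_row] + [[0] + row[:cols] + [0] for row in matrix] + [zero_row]
--     return [[pad[i + 1][j + 1] + pad[i][j + 1] + pad[i + 2][j + 1]
--              + pad[i + 1][j] + pad[i + 1][j + 2]
--              for j in range(cols)]
--             for i in range(len(matrix))]
-- ===== Notes on version B (the rewrite author's own statement) =====
-- stated objective: simpler
-- what changed: Replaces the quadruple boundary conditionals inside the double loop by a zero-padded (rows+2)x(cols+2) table over which one uniform 5-point stencil is taken, built as nested comprehensions instead of preallocate-and-assign.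
import Mathlib
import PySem

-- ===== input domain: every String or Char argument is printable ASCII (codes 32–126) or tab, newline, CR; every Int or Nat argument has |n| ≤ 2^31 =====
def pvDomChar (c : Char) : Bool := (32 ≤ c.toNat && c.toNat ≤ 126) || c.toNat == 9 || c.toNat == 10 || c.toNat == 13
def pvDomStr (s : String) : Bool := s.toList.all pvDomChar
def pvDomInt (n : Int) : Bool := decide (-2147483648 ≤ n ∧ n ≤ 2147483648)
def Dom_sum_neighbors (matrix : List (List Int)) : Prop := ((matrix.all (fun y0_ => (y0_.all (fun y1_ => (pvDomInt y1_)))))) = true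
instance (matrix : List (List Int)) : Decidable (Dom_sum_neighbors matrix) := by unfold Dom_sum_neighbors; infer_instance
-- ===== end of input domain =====

-- B replaces A's four boundary conditionals by one uniform 5-point stencil over a zero-padded table (objective: simpler).

-- ===== PORT A =====
def sum_neighbors (matrix : List (List Int)) : List (List Int) :=
  let rows : Int := (matrix.length : Int)
  let cols : Int := ((PySem.List.pyGetD matrix 0 []).length : Int)
  let new0 : List (List Int) :=
    (PySem.List.pyRange 0 rows 1).map (fun _ => List.replicate cols.toNat (0 : Int))
  (PySem.List.pyRange 0 rows 1).foldl (fun nm i =>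
    (PySem.List.pyRange 0 cols 1).foldl (fun nm j =>
      let total := PySem.List.pyGetD (PySem.List.pyGetD matrix i []) j 0
      let total := if 0 < i then total + PySem.List.pyGetD (PySem.List.pyGetD matrix (i - 1) []) j 0 else total
      let total := if i < rows - 1 then total + PySem.List.pyGetD (PySem.List.pyGetD matrix (i + 1) []) j 0 else total
      let total := if 0 < j then total + PySem.List.pyGetD (PySem.List.pyGetD matrix i []) (j - 1) 0 else total
      let total := if j < cols - 1 then total + PySem.List.pyGetD (PySem.List.pyGetD matrix i []) (j + 1) 0 else total
      PySem.List.pySetD nm i (PySem.List.pySetD (PySem.List.pyGetD nm i []) j total)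
    ) nm
  ) new0

-- ===== PORT B =====
-- helper: pad[i][j] (all reads are in range under Pre_, so the defaults are never hit there)
def pvPadGet (pad : List (List Int)) (i j : Nat) : Int := (pad.getD i []).getD j 0

def sum_neighbors_alt (matrix : List (List Int)) : List (List Int) :=
  let cols := (PySem.List.pyGetD matrix 0 []).length
  let zeroRow : List Int := List.replicate (cols + 2) (0 : Int)
  let pad := zeroRow :: (matrix.map (fun row => 0 :: (row.take cols ++ [0])) ++ [zeroRow])
  (List.range matrix.length).map (fun i =>
    (List.range cols).map (fun j =>
      pvPadGet pad (i + 1) (j + 1) + pvPadGet pad i (j + 1) + pvPadGet pad (i + 2) (j + 1)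
        + pvPadGet pad (i + 1) j + pvPadGet pad (i + 1) (j + 2)))

-- ===== PRECONDITION & SPEC =====
-- Pre_ excludes exactly the inputs where Python A raises IndexError: the empty matrix
-- (len(matrix[0])) and ragged matrices with a row shorter than the first row.
def Pre_sum_neighbors (matrix : List (List Int)) : Prop :=
  matrix ≠ [] ∧ ∀ row ∈ matrix, (matrix.getD 0 []).length ≤ row.length
instance (matrix : List (List Int)) : Decidable (Pre_sum_neighbors matrix) := by
  unfold Pre_sum_neighbors; infer_instance
def pvWitness_sum_neighbors : List (List Int) := [[1, 2], [3, 4]]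

def Spec_sum_neighbors (matrix : List (List Int)) (out : List (List Int)) : Prop := out = sum_neighbors_alt matrix
instance (matrix : List (List Int)) (out : List (List Int)) : Decidable (Spec_sum_neighbors matrix out) := by unfold Spec_sum_neighbors; infer_instance

-- ===== CLAIM (what is proved, stated in full; the proofs are below) =====
def Claim_equal_sum_neighbors : Prop := ∀ (matrix : List (List Int)), Dom_sum_neighbors matrix → Pre_sum_neighbors matrix → Spec_sum_neighbors matrix (sum_neighbors matrix)

-- ===== LEMMAS AND PROOFS =====

-- the value A stores into cell (i, j), over Nat indices
def pvCell (matrix : List (List Int)) (i j : Nat) : Int :=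
  (matrix.getD i []).getD j 0
  + (if 0 < i then (matrix.getD (i - 1) []).getD j 0 else 0)
  + (if i + 1 < matrix.length then (matrix.getD (i + 1) []).getD j 0 else 0)
  + (if 0 < j then (matrix.getD i []).getD (j - 1) 0 else 0)
  + (if j + 1 < (matrix.getD 0 []).length then (matrix.getD i []).getD (j + 1) 0 else 0)

-- A's loop body total, exactly as the port computes it (Int tests, Int ±1 indices)
def pvT (matrix : List (List Int)) (i j : Nat) : Int :=
  let t0 := (matrix.getD i []).getD j 0
  let t1 := if (0 : Int) < (i : Int) then t0 + (PySem.List.pyGetD matrix ((i : Int) - 1) []).getD j 0 else t0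
  let t2 := if (i : Int) < (matrix.length : Int) - 1 then t1 + (PySem.List.pyGetD matrix ((i : Int) + 1) []).getD j 0 else t1
  let t3 := if (0 : Int) < (j : Int) then t2 + PySem.List.pyGetD (matrix.getD i []) ((j : Int) - 1) 0 else t2
  if (j : Int) < ((matrix.getD 0 []).length : Int) - 1 then t3 + PySem.List.pyGetD (matrix.getD i []) ((j : Int) + 1) 0 else t3

lemma pv_foldl_set_range {α : Type} (F : Nat → α → α) (d : α) :
    ∀ (n : Nat) (init : List α), n ≤ init.length →
    (List.range n).foldl (fun xs i => xs.set i (F i (xs.getD i d))) init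
      = (List.range n).map (fun i => F i (init.getD i d)) ++ init.drop n := by
  intro n
  induction n with
  | zero => intro init _; simp
  | succ n ih =>
    intro init h
    have hn : n < init.length := by omega
    rw [List.range_succ, List.foldl_append, List.map_append, ih init (by omega)]
    have hlen : ((List.range n).map (fun i => F i (init.getD i d))).length = n := by simp
    have hget : ((List.range n).map (fun i => F i (init.getD i d)) ++ init.drop n).getD n d
        = init.getD n d := by
      rw [List.getD_eq_getElem?_getD, List.getElem?_append_right (by omega), hlen]
      simp [List.getD_eq_getElem?_getD]
    have hdrop : List.drop n init = init[n] :: List.drop (n + 1) init :=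
      List.drop_eq_getElem_cons hn
    simp only [List.foldl_cons, List.foldl_nil, hget]
    rw [List.set_append_right _ _ (by omega), hlen, Nat.sub_self]
    rw [hdrop, List.set_cons_zero]
    simp [List.getD_eq_getElem?_getD, List.getElem?_eq_getElem hn]

lemma pv_foldl_set_row (t : Nat → Int) (i : Nat) :
    ∀ (js : List Nat) (nm : List (List Int)),
    js.foldl (fun nm j => nm.set i ((nm.getD i []).set j (t j))) nm
      = nm.set i (js.foldl (fun r j => r.set j (t j)) (nm.getD i [])) := by
  intro js
  induction js with
  | nil =>
    intro nm
    simp only [List.foldl_nil]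
    by_cases hi : i < nm.length
    · rw [List.getD_eq_getElem _ _ hi]
      exact (List.set_getElem_self hi).symm
    · rw [List.set_eq_of_length_le (by omega)]
  | cons j rest ih =>
    intro nm
    simp only [List.foldl_cons]
    rw [ih]
    by_cases hi : i < nm.length
    · have h1 : (nm.set i ((nm.getD i []).set j (t j))).getD i []
          = (nm.getD i []).set j (t j) := by
        rw [List.getD_eq_getElem _ _ (by simpa using hi)]
        simp
      rw [h1, List.set_set]
    · have hle : nm.length ≤ i := by omega
      have hs : ∀ r : List Int, nm.set i r = nm := fun r => List.set_eq_of_length_le hle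
      simp only [hs]

lemma pv_T_eq_cell (matrix : List (List Int)) (i j : Nat) :
    pvT matrix i j = pvCell matrix i j := by
  have c1 : ((0 : Int) < (i : Int)) = (0 < i) := by rw [eq_iff_iff]; omega
  have c2 : ((i : Int) < (matrix.length : Int) - 1) = (i + 1 < matrix.length) := by
    rw [eq_iff_iff]; omega
  have c3 : ((0 : Int) < (j : Int)) = (0 < j) := by rw [eq_iff_iff]; omega
  have c4 : ((j : Int) < ((matrix.getD 0 []).length : Int) - 1)
      = (j + 1 < (matrix.getD 0 []).length) := by rw [eq_iff_iff]; omega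
  have d2 : PySem.List.pyGetD matrix ((i : Int) + 1) [] = matrix.getD (i + 1) [] := by
    rw [show ((i : Int) + 1) = ((i + 1 : Nat) : Int) by push_cast; ring,
      PySem.List.pyGetD_natCast]
  have d4 : PySem.List.pyGetD (matrix.getD i []) ((j : Int) + 1) 0
      = (matrix.getD i []).getD (j + 1) 0 := by
    rw [show ((j : Int) + 1) = ((j + 1 : Nat) : Int) by push_cast; ring,
      PySem.List.pyGetD_natCast]
  by_cases h1 : 0 < i <;> by_cases h2 : i + 1 < matrix.length <;>
    by_cases h3 : 0 < j <;> by_cases h4 : j + 1 < (matrix.getD 0 []).length <;>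
    · simp only [pvT, pvCell, c1, c2, c3, c4, d2, d4, h1, h2, h3, h4, if_true, if_false]
      try rw [show ((i : Int) - 1) = ((i - 1 : Nat) : Int) by omega,
        PySem.List.pyGetD_natCast]
      try rw [show ((j : Int) - 1) = ((j - 1 : Nat) : Int) by omega,
        PySem.List.pyGetD_natCast]
      try ring

lemma pv_A_eq_map (matrix : List (List Int)) :
    sum_neighbors matrix
      = (List.range matrix.length).map (fun i =>
          (List.range (matrix.getD 0 []).length).map (fun j => pvCell matrix i j)) := by
  simp only [sum_neighbors, PySem.List.pyGetD_zero, PySem.List.pyRange_zero_natCast,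
    List.foldl_map, PySem.List.pyGetD_natCast, PySem.List.pySetD_natCast, Int.toNat_natCast]
  change List.foldl (fun nm i =>
      List.foldl (fun (nm : List (List Int)) (j : Nat) =>
        nm.set i ((nm.getD i []).set j (pvT matrix i j))) nm
        (List.range (matrix.getD 0 []).length))
    (List.map (fun _ => List.replicate (matrix.getD 0 []).length (0 : Int))
      (List.map (fun (k : Nat) => (k : Int)) (List.range matrix.length)))
    (List.range matrix.length) = _
  have hfun : (fun (nm : List (List Int)) (i : Nat) =>
      List.foldl (fun (nm : List (List Int)) (j : Nat) =>
        nm.set i ((nm.getD i []).set j (pvT matrix i j))) nm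
        (List.range (matrix.getD 0 []).length))
      = (fun nm i => nm.set i (List.foldl (fun r j => r.set j (pvT matrix i j))
          (nm.getD i []) (List.range (matrix.getD 0 []).length))) := by
    funext nm i
    exact pv_foldl_set_row (fun j => pvT matrix i j) i _ nm
  rw [hfun]
  refine Eq.trans (pv_foldl_set_range (fun i r => List.foldl
      (fun r j => r.set j (pvT matrix i j)) r (List.range (matrix.getD 0 []).length))
    ([] : List Int) matrix.length
    (List.map (fun _ => List.replicate (matrix.getD 0 []).length (0 : Int))
      (List.map (fun (k : Nat) => (k : Int)) (List.range matrix.length))) (by simp)) ?_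
  rw [List.drop_eq_nil_of_le (by simp), List.append_nil]
  refine List.map_congr_left fun i hi => ?_
  have hi' : i < matrix.length := List.mem_range.mp hi
  have hinit : (List.map (fun _ => List.replicate (matrix.getD 0 []).length (0 : Int))
      (List.map (fun (k : Nat) => (k : Int)) (List.range matrix.length))).getD i []
      = List.replicate (matrix.getD 0 []).length (0 : Int) := by
    rw [List.getD_eq_getElem _ _ (by simp [hi']), List.getElem_map]
  rw [hinit]
  refine Eq.trans (pv_foldl_set_range (fun j _ => pvT matrix i j) (0 : Int)
      (matrix.getD 0 []).length (List.replicate (matrix.getD 0 []).length 0) (by simp)) ?_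
  rw [List.drop_eq_nil_of_le (by simp), List.append_nil]
  refine List.map_congr_left fun j _ => ?_
  beta_reduce
  exact pv_T_eq_cell matrix i j

-- the padded table B builds, named for the proofs
def pvPad (matrix : List (List Int)) : List (List Int) :=
  List.replicate ((matrix.getD 0 []).length + 2) (0 : Int) ::
    (matrix.map (fun row => 0 :: (row.take (matrix.getD 0 []).length ++ [0])) ++
      [List.replicate ((matrix.getD 0 []).length + 2) (0 : Int)])

lemma pv_zero_get (n l : Nat) : (List.replicate n (0 : Int)).getD l 0 = 0 := by
  by_cases h : l < n
  · rw [List.getD_replicate _ h]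
  · rw [List.getD_eq_default _ _ (by simpa using (by omega : n ≤ l))]

lemma pv_pad_top (matrix : List (List Int)) :
    (pvPad matrix).getD 0 [] = List.replicate ((matrix.getD 0 []).length + 2) (0 : Int) := by
  simp [pvPad]

lemma pv_pad_interior (matrix : List (List Int)) (i : Nat) (hi : i < matrix.length) :
    (pvPad matrix).getD (i + 1) []
      = 0 :: ((matrix.getD i []).take (matrix.getD 0 []).length ++ [0]) := by
  simp only [pvPad, List.getD_cons_succ]
  rw [List.getD_eq_getElem _ _ (by simp; omega),
    List.getElem_append_left (by simpa using hi), List.getElem_map,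
    List.getD_eq_getElem _ _ hi]

lemma pv_pad_bottom (matrix : List (List Int)) :
    (pvPad matrix).getD (matrix.length + 1) []
      = List.replicate ((matrix.getD 0 []).length + 2) (0 : Int) := by
  simp only [pvPad, List.getD_cons_succ]
  rw [List.getD_eq_getElem _ _ (by simp), List.getElem_append_right (by simp)]
  simp

lemma pv_irow_mid (row : List Int) (cols j : Nat) (hlen : cols ≤ row.length)
    (hj : j < cols) :
    (0 :: (row.take cols ++ [0])).getD (j + 1) 0 = row.getD j 0 := by
  rw [List.getD_cons_succ,
    List.getD_eq_getElem _ _ (by simp; omega),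
    List.getElem_append_left (by simp; omega),
    List.getElem_take, List.getD_eq_getElem _ _ (by omega)]

lemma pv_irow_left (row : List Int) (cols : Nat) :
    (0 :: (row.take cols ++ [0])).getD 0 0 = 0 := rfl

lemma pv_irow_right (row : List Int) (cols : Nat) (hlen : cols ≤ row.length) :
    (0 :: (row.take cols ++ [0])).getD (cols + 1) 0 = 0 := by
  have ht : (row.take cols).length = cols := by simp; omega
  rw [List.getD_cons_succ, List.getD_eq_getElem _ _ (by simp; omega),
    List.getElem_append_right (by omega)]
  simp [ht]

lemma pv_cell_eq (matrix : List (List Int))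
    (hpre : ∀ row ∈ matrix, (matrix.getD 0 []).length ≤ row.length)
    (i j : Nat) (hi : i < matrix.length) (hj : j < (matrix.getD 0 []).length) :
    pvPadGet (pvPad matrix) (i + 1) (j + 1) + pvPadGet (pvPad matrix) i (j + 1)
      + pvPadGet (pvPad matrix) (i + 2) (j + 1) + pvPadGet (pvPad matrix) (i + 1) j
      + pvPadGet (pvPad matrix) (i + 1) (j + 2)
      = pvCell matrix i j := by
  have hrow : ∀ k, k < matrix.length → (matrix.getD 0 []).length ≤ (matrix.getD k []).length := by
    intro k hk
    exact hpre _ (by rw [List.getD_eq_getElem _ _ hk]; exact List.getElem_mem hk)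
  have e1 : pvPadGet (pvPad matrix) (i + 1) (j + 1) = (matrix.getD i []).getD j 0 := by
    rw [pvPadGet, pv_pad_interior _ i hi, pv_irow_mid _ _ _ (hrow i hi) hj]
  have e2 : pvPadGet (pvPad matrix) i (j + 1)
      = (if 0 < i then (matrix.getD (i - 1) []).getD j 0 else 0) := by
    by_cases h : 0 < i
    · rw [if_pos h, pvPadGet, show i = (i - 1) + 1 by omega,
        pv_pad_interior _ (i - 1) (by omega),
        pv_irow_mid _ _ _ (hrow (i - 1) (by omega)) hj]
      simp
    · rw [if_neg h, pvPadGet, show i = 0 by omega, pv_pad_top, pv_zero_get]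
  have e3 : pvPadGet (pvPad matrix) (i + 2) (j + 1)
      = (if i + 1 < matrix.length then (matrix.getD (i + 1) []).getD j 0 else 0) := by
    by_cases h : i + 1 < matrix.length
    · rw [if_pos h, pvPadGet, show i + 2 = (i + 1) + 1 by omega,
        pv_pad_interior _ (i + 1) h, pv_irow_mid _ _ _ (hrow (i + 1) h) hj]
    · rw [if_neg h, pvPadGet, show i + 2 = matrix.length + 1 by omega,
        pv_pad_bottom, pv_zero_get]
  have e4 : pvPadGet (pvPad matrix) (i + 1) j
      = (if 0 < j then (matrix.getD i []).getD (j - 1) 0 else 0) := by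
    by_cases h : 0 < j
    · rw [if_pos h, pvPadGet, pv_pad_interior _ i hi, show j = (j - 1) + 1 by omega,
        pv_irow_mid _ _ _ (hrow i hi) (by omega)]
      simp
    · rw [if_neg h, pvPadGet, pv_pad_interior _ i hi, show j = 0 by omega,
        pv_irow_left]
  have e5 : pvPadGet (pvPad matrix) (i + 1) (j + 2)
      = (if j + 1 < (matrix.getD 0 []).length
          then (matrix.getD i []).getD (j + 1) 0 else 0) := by
    by_cases h : j + 1 < (matrix.getD 0 []).length
    · rw [if_pos h, pvPadGet, pv_pad_interior _ i hi, show j + 2 = (j + 1) + 1 by omega,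
        pv_irow_mid _ _ _ (hrow i hi) h]
    · rw [if_neg h, pvPadGet, pv_pad_interior _ i hi,
        show j + 2 = (matrix.getD 0 []).length + 1 by omega,
        pv_irow_right _ _ (hrow i hi)]
  rw [e1, e2, e3, e4, e5, pvCell]

lemma pv_B_eq_map (matrix : List (List Int))
    (hpre : ∀ row ∈ matrix, (matrix.getD 0 []).length ≤ row.length) :
    sum_neighbors_alt matrix
      = (List.range matrix.length).map (fun i =>
          (List.range (matrix.getD 0 []).length).map (fun j => pvCell matrix i j)) := by
  simp only [sum_neighbors_alt, PySem.List.pyGetD_zero]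
  refine List.map_congr_left fun i hi => ?_
  refine List.map_congr_left fun j hj => ?_
  exact pv_cell_eq matrix hpre i j (List.mem_range.mp hi) (List.mem_range.mp hj)

-- ===== VERDICT (by name: the statement is the Claim_ definition above) =====
theorem sum_neighbors_spec : Claim_equal_sum_neighbors := by
  intro matrix _ hpre
  unfold Spec_sum_neighbors
  rw [pv_A_eq_map, pv_B_eq_map matrix hpre.2]
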